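-- pv_equiv track=rewrite | github.com/boubascript/CS-12700-assignments | final/py1cannibals.py | canibals
-- ===== SOURCE A (Python) =====
-- def increaseby(data,value):
--   count = 0
--   for n in data:
--     if(n < value):
--       count +=1
--   return count
--
-- def canibals(data,target):
--   count = 0;
--   for n in data:
--     if(n > target):
--       count +=1
--     else:
--       if(n + increaseby(data,n) >= target):
--         count +=1
--   return count
-- ===== SOURCE B (Python) =====
-- def canibals(data, target):
--     s = sorted(data)
--     def smaller(x):
--         # lower-bound binary search: number of elements of s strictly below x
--         lo, hi = 0, len(s)
--         while lo < hi:
--             mid = (lo + hi) // 2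
--             if s[mid] < x:
--                 lo = mid + 1
--             else:
--                 hi = mid
--         return lo
--     count = 0
--     for n in data:
--         if n > target or n + smaller(n) >= target:
--             count += 1
--     return count
-- ===== Notes on version B (the rewrite author's own statement) =====
-- stated objective: faster
-- what changed: Replaced the per-element full rescan (increaseby) with one sort followed by a hand-written lower-bound binary search per element, turning O(n^2) into O(n log n).
import Mathlib
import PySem

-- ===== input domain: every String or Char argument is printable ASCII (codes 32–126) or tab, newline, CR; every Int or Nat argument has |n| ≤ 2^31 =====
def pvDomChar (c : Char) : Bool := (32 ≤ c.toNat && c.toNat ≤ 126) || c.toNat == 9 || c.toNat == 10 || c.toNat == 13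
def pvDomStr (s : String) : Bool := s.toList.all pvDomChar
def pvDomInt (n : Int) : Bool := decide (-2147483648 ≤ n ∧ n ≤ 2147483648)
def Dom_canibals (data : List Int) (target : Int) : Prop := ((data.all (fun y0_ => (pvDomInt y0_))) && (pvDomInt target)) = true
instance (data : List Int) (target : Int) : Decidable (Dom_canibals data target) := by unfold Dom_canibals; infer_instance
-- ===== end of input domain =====

-- B replaces A's per-element full rescan by one sort + a lower-bound binary search per element (faster, O(n log n) vs O(n^2)).

-- ===== PORT A =====
def increaseby (data : List Int) (value : Int) : Int :=
  data.foldl (fun count n => if n < value then count + 1 else count) 0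

def canibals (data : List Int) (target : Int) : Int :=
  data.foldl (fun count n =>
    if n > target then count + 1
    else if n + increaseby data n ≥ target then count + 1 else count) 0

-- ===== PORT B =====
-- the hand-written while-loop lower-bound search of Source B, as recursion on hi - lo
def smallerAux (s : List Int) (x : Int) (lo hi : Nat) : Nat :=
  if lo < hi then
    let mid := (lo + hi) / 2
    if s.getD mid 0 < x then smallerAux s x (mid + 1) hi
    else smallerAux s x lo mid
  else lo
termination_by hi - lo
decreasing_by all_goals omega

def canibals_alt (data : List Int) (target : Int) : Int :=
  let s := PySem.List.sorted data (fun x => x) false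
  data.foldl (fun count n =>
    if n > target ∨ n + (smallerAux s n 0 s.length : Int) ≥ target then count + 1
    else count) 0

-- ===== PRECONDITION & SPEC =====
def Spec_canibals (data : List Int) (target : Int) (out : Int) : Prop := out = canibals_alt data target
instance (data : List Int) (target : Int) (out : Int) : Decidable (Spec_canibals data target out) := by unfold Spec_canibals; infer_instance

-- ===== CLAIM (what is proved, stated in full; the proofs are below) =====
def Claim_equal_canibals : Prop := ∀ (data : List Int) (target : Int), Dom_canibals data target → Spec_canibals data target (canibals data target)

-- ===== LEMMAS AND PROOFS =====

-- in a ≤-sorted list, the elements below x are exactly the first countP-many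
theorem sorted_lt_iff_lt_countP (s : List Int) (x : Int)
    (hs : s.Pairwise (· ≤ ·)) (i : Nat) (hi : i < s.length) :
    (s[i] < x ↔ i < s.countP (fun n => decide (n < x))) := by
  induction s generalizing i with
  | nil => simp at hi
  | cons a t ih =>
    rcases List.pairwise_cons.mp hs with ⟨ha, ht⟩
    by_cases hax : a < x
    · cases i with
      | zero => simp [hax]
      | succ j =>
        have hj : j < t.length := by simpa using hi
        have := ih ht j hj
        simp only [List.getElem_cons_succ, List.countP_cons, hax] at *
        simpa [Nat.succ_lt_succ_iff] using this
    · have hzero : t.countP (fun n => decide (n < x)) = 0 := by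
        rw [List.countP_eq_zero]
        intro b hb
        have := ha b hb
        simp only [decide_eq_true_eq]
        omega
      cases i with
      | zero => simp [hax, hzero]
      | succ j =>
        have hj : j < t.length := by simpa using hi
        have hbx : ¬ t[j] < x := by
          have := ha t[j] (List.getElem_mem hj)
          omega
        simp [hax, hzero, hbx]

theorem smallerAux_eq_countP (s : List Int) (x : Int) (hs : s.Pairwise (· ≤ ·))
    (lo hi : Nat) (hlo : lo ≤ s.countP (fun n => decide (n < x)))
    (hhi : s.countP (fun n => decide (n < x)) ≤ hi) (hlen : hi ≤ s.length) :
    smallerAux s x lo hi = s.countP (fun n => decide (n < x)) := by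
  set k := s.countP (fun n => decide (n < x)) with hk
  rw [smallerAux]
  by_cases h : lo < hi
  · have hmid : (lo + hi) / 2 < s.length := by omega
    have hiff := sorted_lt_iff_lt_countP s x hs ((lo + hi) / 2) hmid
    have hget : s.getD ((lo + hi) / 2) 0 = s[(lo + hi) / 2] := List.getD_eq_getElem s 0 hmid
    simp only [h, if_true, hget]
    by_cases hm : s[(lo + hi) / 2] < x
    · have : (lo + hi) / 2 < k := hiff.mp hm
      rw [if_pos hm]
      exact smallerAux_eq_countP s x hs _ _ (by omega) hhi hlen
    · have : ¬ (lo + hi) / 2 < k := fun hc => hm (hiff.mpr hc)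
      rw [if_neg hm]
      exact smallerAux_eq_countP s x hs lo _ hlo (by omega) (by omega)
  · simp only [h, if_false]
    omega
termination_by hi - lo
decreasing_by all_goals omega

-- A's helper counts the elements below value
theorem increaseby_eq_countP (data : List Int) (value : Int) :
    increaseby data value = (data.countP (fun n => decide (n < value)) : Int) := by
  unfold increaseby
  suffices h : ∀ (l : List Int) (a : Int),
      l.foldl (fun count n => if n < value then count + 1 else count) a
        = a + (l.countP (fun n => decide (n < value)) : Int) by
    simpa using h data 0
  intro l
  induction l with
  | nil => simp
  | cons b t ih =>
    intro a
    by_cases hb : b < value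
    · simp [hb, ih]; ring
    · simp [hb, ih]

-- B's per-element search equals A's per-element rescan
theorem smaller_eq_increaseby (data : List Int) (n : Int) :
    (smallerAux (PySem.List.sorted data (fun x => x) false) n 0
        (PySem.List.sorted data (fun x => x) false).length : Int)
      = increaseby data n := by
  set s := PySem.List.sorted data (fun x => x) false with hsdef
  have hs : s.Pairwise (· ≤ ·) := by
    simpa using PySem.List.sorted_pairwise (xs := data) (key := fun x => x)
  have hperm : s.Perm data := PySem.List.sorted_perm data (fun x => x) false
  have hle : s.countP (fun m => decide (m < n)) ≤ s.length := List.countP_le_length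
  rw [smallerAux_eq_countP s n hs 0 s.length (Nat.zero_le _) hle (le_refl _),
      hperm.countP_eq, increaseby_eq_countP]

-- ===== VERDICT (by name: the statement is the Claim_ definition above) =====
theorem canibals_spec : Claim_equal_canibals := by
  intro data target _
  unfold Spec_canibals canibals canibals_alt
  simp only []
  congr 1
  funext count n
  rw [smaller_eq_increaseby data n]
  by_cases h1 : n > target
  · simp [h1]
  · by_cases h2 : n + increaseby data n ≥ target <;> simp [h1, h2]
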